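-- pv_equiv track=rewrite | github.com/MicheleCESO/ROAmbulatori | greedy.py | LPTGreedy
-- ===== SOURCE A (Python) =====
-- def LPTGreedy(istanza):
-- 	durataPazienti = [sum(x) for x in istanza] # Generazione del vettore delle durate
-- 	indiciPazienti = [x for x in range(len(istanza))] # Generazione del vettore degli indici
--
-- 	listaIndici = [] # Soluzione della greedy
-- 	while indiciPazienti: # Fintanto che la lista non è vuota
-- 		indiceCandidato = durataPazienti.index(max(durataPazienti)) # Indice del candidato
-- 		listaIndici.append(indiciPazienti[indiceCandidato]) # Salvo l'indice del paziente nell'istanza da utilizzare successivamente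
--
-- 		del durataPazienti[indiceCandidato], indiciPazienti[indiceCandidato] # Rimozione del paziente già scelto
--
-- 	return listaIndici
-- ===== SOURCE B (Python) =====
-- def LPTGreedy(istanza):
-- 	# One stable sort by (-total duration, index) instead of repeated max-scan + delete.
-- 	return [i for _, i in sorted((-sum(x), i) for i, x in enumerate(istanza))]
-- ===== Notes on version B (the rewrite author's own statement) =====
-- stated objective: idiomatic
-- what changed: Replaces A's quadratic repeated max-scan-and-delete selection loop with a single stable sort of (-total duration, index) pairs.
import Mathlib
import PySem

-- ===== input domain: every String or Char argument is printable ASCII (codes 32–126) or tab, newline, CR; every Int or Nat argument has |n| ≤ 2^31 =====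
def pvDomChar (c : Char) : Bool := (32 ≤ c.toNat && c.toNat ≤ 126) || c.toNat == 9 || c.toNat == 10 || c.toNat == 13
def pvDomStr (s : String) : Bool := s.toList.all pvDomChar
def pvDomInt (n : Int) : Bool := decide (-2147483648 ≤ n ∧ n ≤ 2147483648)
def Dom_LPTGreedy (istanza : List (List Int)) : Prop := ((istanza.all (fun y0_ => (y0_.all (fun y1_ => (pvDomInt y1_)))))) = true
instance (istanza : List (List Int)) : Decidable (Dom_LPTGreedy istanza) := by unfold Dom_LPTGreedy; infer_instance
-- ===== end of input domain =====

-- B replaces A's quadratic max-scan-and-delete selection loop with one stable sort of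
-- (-total duration, index) pairs (objective: idiomatic).

-- ===== PORT A =====
-- A's while-loop: repeatedly take the first index of the maximal remaining duration,
-- record the corresponding patient index, and delete both entries.  The `none`/`else acc`
-- branches only make the recursion total; with equal-length lists (always the case for
-- A's top-level call) they are never taken.
def LPTGreedy.loop (durate indici acc : List Int) : List Int :=
  if indici = [] then acc
  else
    match PySem.List.max? durate (fun x => x) with
    | none => acc
    | some m =>
      match PySem.List.index? durate m with
      | none => acc
      | some k =>
        if _hk : k < indici.length then
          LPTGreedy.loop (durate.eraseIdx k) (indici.eraseIdx k)
            (acc ++ [PySem.List.pyGetD indici (k : Int) 0])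
        else acc
termination_by indici.length
decreasing_by simp [List.length_eraseIdx, _hk]; omega

def LPTGreedy (istanza : List (List Int)) : List Int :=
  let durataPazienti := istanza.map (fun x => x.sum)
  let indiciPazienti := (PySem.List.pyRange 0 (istanza.length : Int) 1).map (fun x => x)
  LPTGreedy.loop durataPazienti indiciPazienti []

-- ===== PORT B =====
-- Source B: return [i for _, i in sorted((-sum(x), i) for i, x in enumerate(istanza))]
def LPTGreedy_alt (istanza : List (List Int)) : List Int :=
  (PySem.List.sorted2
      ((PySem.List.enumerate istanza).map (fun p => (-(p.2.sum), p.1)))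
      (fun q => q.1) (fun q => q.2) false).map (fun q => q.2)

-- ===== PRECONDITION & SPEC =====
def Spec_LPTGreedy (istanza : List (List Int)) (out : List Int) : Prop := out = LPTGreedy_alt istanza
instance (istanza : List (List Int)) (out : List Int) : Decidable (Spec_LPTGreedy istanza out) := by unfold Spec_LPTGreedy; infer_instance

-- ===== CLAIM (what is proved, stated in full; the proofs are below) =====
def Claim_equal_LPTGreedy : Prop := ∀ (istanza : List (List Int)), Dom_LPTGreedy istanza → Spec_LPTGreedy istanza (LPTGreedy istanza)

-- ===== LEMMAS AND PROOFS =====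

-- the boolean "before" comparison sorted2 uses for key (fst, snd) on Int × Int pairs
def pvBlex (a b : Int × Int) : Bool :=
  decide (a.1 < b.1) || (!decide (b.1 < a.1) && decide (a.2 < b.2))

-- strict lexicographic order on pairs (descending fst would be its mirror)
def pvLexLt (a b : Int × Int) : Prop := a.1 < b.1 ∨ (a.1 = b.1 ∧ a.2 < b.2)

-- the order in which A emits pairs: fst (duration) descending, snd (index) ascending on ties
def pvDescLt (a b : Int × Int) : Prop := b.1 < a.1 ∨ (a.1 = b.1 ∧ a.2 < b.2)

theorem pvBlex_iff (a b : Int × Int) : pvBlex a b = true ↔ pvLexLt a b := by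
  simp [pvBlex, pvLexLt]; omega

theorem pvBlex_false_iff (a b : Int × Int) : pvBlex a b = false ↔ ¬ pvLexLt a b := by
  rw [← pvBlex_iff]; simp

theorem sorted2_eq_foldl (qs : List (Int × Int)) :
    PySem.List.sorted2 qs (fun q => q.1) (fun q => q.2) false
      = qs.foldl (fun acc x => PySem.List.insertBy pvBlex x acc) [] := by
  rfl

theorem insertBy_pvBlex_pairwise (x : Int × Int) (ys : List (Int × Int))
    (h : ys.Pairwise (fun a b => pvBlex b a = false)) :
    (PySem.List.insertBy pvBlex x ys).Pairwise (fun a b => pvBlex b a = false) := by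
  induction ys with
  | nil => simp [PySem.List.insertBy]
  | cons y t ih =>
    rw [List.pairwise_cons] at h
    obtain ⟨hy, ht⟩ := h
    by_cases hxy : pvBlex x y = true
    · rw [show PySem.List.insertBy pvBlex x (y :: t) = x :: y :: t by
        simp [PySem.List.insertBy, hxy]]
      refine List.Pairwise.cons ?_ (List.Pairwise.cons hy ht)
      intro z hz
      rw [pvBlex_iff] at hxy
      rcases List.mem_cons.mp hz with hz | hz
      · subst hz
        rw [pvBlex_false_iff]
        unfold pvLexLt at *; omega
      · have hzy := hy z hz
        rw [pvBlex_false_iff] at hzy ⊢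
        unfold pvLexLt at *; omega
    · rw [show PySem.List.insertBy pvBlex x (y :: t) = y :: PySem.List.insertBy pvBlex x t by
        simp [PySem.List.insertBy, hxy]]
      refine List.Pairwise.cons ?_ (ih ht)
      intro z hz
      rw [PySem.List.insertBy_mem_iff] at hz
      rcases hz with hz | hz
      · subst hz; simpa using hxy
      · exact hy z hz

theorem foldl_insertBy_pairwise (qs : List (Int × Int)) :
    ∀ acc : List (Int × Int), acc.Pairwise (fun a b => pvBlex b a = false) →
      (qs.foldl (fun acc x => PySem.List.insertBy pvBlex x acc) acc).Pairwise
        (fun a b => pvBlex b a = false) := by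
  induction qs with
  | nil => intro acc h; simpa using h
  | cons q t ih =>
    intro acc h
    exact ih _ (insertBy_pvBlex_pairwise q acc h)

-- sorted2 of a duplicate-free pair list is strictly lexicographically increasing
theorem sorted2_pairwise_lexLt (qs : List (Int × Int)) (hnd : qs.Nodup) :
    (PySem.List.sorted2 qs (fun q => q.1) (fun q => q.2) false).Pairwise pvLexLt := by
  have hw : (PySem.List.sorted2 qs (fun q => q.1) (fun q => q.2) false).Pairwise
      (fun a b => pvBlex b a = false) := by
    rw [sorted2_eq_foldl]
    exact foldl_insertBy_pairwise qs [] (by simp)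
  have hnd' : (PySem.List.sorted2 qs (fun q => q.1) (fun q => q.2) false).Nodup :=
    (PySem.List.sorted2_perm qs _ _ false).nodup_iff.mpr hnd
  have hand := hw.and (List.nodup_iff_pairwise_ne.mp hnd')
  refine hand.imp ?_
  intro a b hab
  obtain ⟨h1, h2⟩ := hab
  rw [pvBlex_false_iff] at h1
  have hcomp : a.1 ≠ b.1 ∨ a.2 ≠ b.2 := by
    by_contra hc
    rw [not_or, not_not, not_not] at hc
    exact h2 (Prod.ext hc.1 hc.2)
  unfold pvLexLt at *; omega

-- erasing the same index from both halves of a zip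
theorem zip_eraseIdx (a : List Int) :
    ∀ (b : List Int) (k : Nat), a.length = b.length →
      (a.zip b).eraseIdx k = (a.eraseIdx k).zip (b.eraseIdx k) := by
  induction a with
  | nil => intro b k _; simp
  | cons x a ih =>
    intro b k hlen
    cases b with
    | nil => simp at hlen
    | cons y b =>
      cases k with
      | zero => simp
      | succ k =>
        simp only [List.zip_cons_cons, List.eraseIdx_cons_succ]
        rw [ih b k (by simpa using hlen)]

-- a list is a permutation of its k-th element consed on its k-th erasure
theorem perm_cons_eraseIdx {α : Type} (l : List α) (k : Nat) (hk : k < l.length) :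
    l.Perm (l[k] :: l.eraseIdx k) := by
  conv_lhs => rw [← List.take_append_drop k l]
  rw [List.eraseIdx_eq_take_drop_succ, List.drop_eq_getElem_cons hk]
  exact List.perm_middle

-- A's selection loop emits exactly any pvDescLt-sorted rearrangement of the zipped pairs
theorem loop_eq (n : Nat) : ∀ (durate indici acc : List Int) (L : List (Int × Int)),
    indici.length = n →
    durate.length = indici.length →
    (durate.zip indici).Pairwise (fun a b => a.2 < b.2) →
    L.Perm (durate.zip indici) → L.Pairwise pvDescLt →
    LPTGreedy.loop durate indici acc = acc ++ L.map (fun p => p.2) := by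
  induction n with
  | zero =>
    intro durate indici acc L hn hlen hz hperm hsort
    have hind : indici = [] := List.length_eq_zero_iff.mp hn
    subst hind
    have : L = [] := by
      have := hperm; simp at this; exact this
    subst this
    rw [LPTGreedy.loop]; simp
  | succ n ih =>
    intro durate indici acc L hn hlen hz hperm hsort
    have hne : indici ≠ [] := by intro h; subst h; simp at hn
    have hdne : durate ≠ [] := by
      intro h; subst h; simp at hlen; exact hne (List.length_eq_zero_iff.mp hlen.symm)
    obtain ⟨m, hmax⟩ : ∃ m, PySem.List.max? durate (fun x => x) = some m := by
      cases hm : PySem.List.max? durate (fun x => x) with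
      | none => exact absurd ((PySem.List.max?_eq_none_iff durate (fun x => x)).mp hm) hdne
      | some m => exact ⟨m, rfl⟩
    have hmmem : m ∈ durate := PySem.List.max?_mem hmax
    have hmmax : ∀ y ∈ durate, y ≤ m := by
      intro y hy; exact PySem.List.max?_isMax hmax y hy
    obtain ⟨k, hidx⟩ : ∃ k, PySem.List.index? durate m = some k := by
      cases hi : PySem.List.index? durate m with
      | none => exact absurd hmmem ((PySem.List.index?_eq_none_iff durate m).mp hi)
      | some k => exact ⟨k, rfl⟩
    obtain ⟨hkd, hdk, hfirst⟩ := PySem.List.getElem_of_index?_eq_some hidx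
    have hk : k < indici.length := hlen ▸ hkd
    have hkz : k < (durate.zip indici).length := by simp [List.length_zip]; omega
    -- one unfolding of the loop
    rw [LPTGreedy.loop]
    simp only [if_neg hne, hmax, hidx, dif_pos hk]
    -- identify the head of L
    have hLne : L ≠ [] := by
      intro h; subst h
      have := hperm.length_eq; simp [List.length_zip] at this; omega
    obtain ⟨h0, t, rfl⟩ := List.exists_cons_of_ne_nil hLne
    rw [List.pairwise_cons] at hsort
    obtain ⟨hhd, htsort⟩ := hsort
    have hzk : (durate.zip indici)[k] = (durate[k], indici[k]) := List.getElem_zip ..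
    have hzkL : (durate.zip indici)[k] ∈ h0 :: t := hperm.mem_iff.mpr (List.getElem_mem hkz)
    have hh0mem : h0 ∈ durate.zip indici := hperm.mem_iff.mp List.mem_cons_self
    obtain ⟨j, hj, hjh⟩ := List.mem_iff_getElem.mp hh0mem
    have hjz : (durate.zip indici)[j] = (durate[j]'(by simp [List.length_zip] at hj; omega),
        indici[j]'(by simp [List.length_zip] at hj; omega)) := List.getElem_zip ..
    have hh1 : h0.1 = durate[j]'(by simp [List.length_zip] at hj; omega) := by
      rw [← hjh, hjz]
    have hh2 : h0.2 = indici[j]'(by simp [List.length_zip] at hj; omega) := by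
      rw [← hjh, hjz]
    have hh1le : h0.1 ≤ m := by
      rw [hh1]; exact hmmax _ (List.getElem_mem _)
    have hpairget := List.pairwise_iff_getElem.mp hz
    have hhead : h0 = (durate[k], indici[k]) := by
      rcases List.mem_cons.mp hzkL with hzkh | hzkt
    -- zip[k] is the head itself
      · rw [← hzkh, hzk]
    -- zip[k] is in the tail: derive h0.1 = m and h0.2 < indici[k], then contradiction
      · have hd0 := hhd _ hzkt
        rw [hzk] at hd0
        have hm1 : h0.1 = m := by
          rcases hd0 with hlt | ⟨heq, _⟩
          · simp at hlt; omega
          · rw [heq]; simpa using hdk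
        have hs2 : h0.2 < indici[k] := by
          rcases hd0 with hlt | ⟨_, hlt2⟩
          · exfalso; simp at hlt; omega
          · simpa using hlt2
        have hkj : k ≤ j := by
          by_contra hjk
          exact hfirst j (by omega) (by rw [← hh1, hm1])
        have hjk' : k < j ∨ k = j := by omega
        rcases hjk' with hkj' | hkj'
        · have := hpairget k j (by simp [List.length_zip] at hj ⊢; omega) hj hkj'
          rw [hzk, hjz] at this
          simp at this
          rw [← hh2] at this
          omega
        · exfalso; subst hkj'; rw [hh2] at hs2; exact absurd hs2 (lt_irrefl _)
    -- peel the head off the permutation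
    have hperm' : t.Perm ((durate.eraseIdx k).zip (indici.eraseIdx k)) := by
      have h1 : (h0 :: t).Perm ((durate.zip indici)[k] :: (durate.zip indici).eraseIdx k) :=
        hperm.trans (perm_cons_eraseIdx _ k hkz)
      rw [hzk, ← hhead] at h1
      have h2 := h1.cons_inv
      rwa [zip_eraseIdx durate indici k hlen] at h2
    have hz' : ((durate.eraseIdx k).zip (indici.eraseIdx k)).Pairwise
        (fun a b => a.2 < b.2) := by
      rw [← zip_eraseIdx durate indici k hlen]
      exact hz.sublist (List.eraseIdx_sublist _ k)
    have hlen' : (durate.eraseIdx k).length = (indici.eraseIdx k).length := by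
      simp [List.length_eraseIdx, hkd, hk]; omega
    have hn' : (indici.eraseIdx k).length = n := by
      simp [List.length_eraseIdx, hk]; omega
    rw [ih (durate.eraseIdx k) (indici.eraseIdx k)
        (acc ++ [PySem.List.pyGetD indici (k : Int) 0]) t hn' hlen' hz' hperm' htsort]
    have hget : PySem.List.pyGetD indici (k : Int) 0 = indici[k] := by
      simp [PySem.List.pyGetD_natCast, List.getElem?_eq_getElem hk]
    rw [hget, hhead]
    simp

-- the pair list B sorts is A's zip with negated first components
theorem enum_map_eq_zip (xs : List (List Int)) : ∀ s : Int,
    (PySem.List.enumerate xs s).map (fun p => (-(p.2.sum), p.1))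
      = ((xs.map (fun x => x.sum)).zip
          (PySem.List.pyRange s (s + xs.length) 1)).map (fun p => (-p.1, p.2)) := by
  induction xs with
  | nil => intro s; simp [PySem.List.enumerate_nil]
  | cons x xs ih =>
    intro s
    rw [PySem.List.enumerate_cons]
    have hr : PySem.List.pyRange s (s + ((x :: xs).length : Nat)) 1
        = s :: PySem.List.pyRange (s + 1) ((s + 1) + (xs.length : Nat)) 1 := by
      rw [PySem.List.pyRange_one_cons (show s < s + (((x :: xs).length : Nat) : Int) by
        rw [List.length_cons]; push_cast; omega)]
      congr 2
      rw [List.length_cons]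
      push_cast
      ring
    rw [hr]
    simp only [List.map_cons, List.zip_cons_cons]
    rw [ih (s + 1)]

-- ===== VERDICT (by name: the statement is the Claim_ definition above) =====
theorem LPTGreedy_spec : Claim_equal_LPTGreedy := by
  intro istanza _
  unfold Spec_LPTGreedy
  show LPTGreedy.loop (istanza.map (fun x => x.sum))
      ((PySem.List.pyRange 0 (istanza.length : Int) 1).map (fun x => x)) []
    = LPTGreedy_alt istanza
  rw [List.map_id']
  set durate := istanza.map (fun x => x.sum) with hdurdef
  set R := PySem.List.pyRange 0 (istanza.length : Int) 1 with hRdef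
  set qs := (PySem.List.enumerate istanza).map (fun p => (-(p.2.sum), p.1)) with hqsdef
  have hqz : qs = (durate.zip R).map (fun p => (-p.1, p.2)) := by
    rw [hqsdef, enum_map_eq_zip istanza 0, hdurdef, hRdef]
    norm_num
  have hRlen : R.length = istanza.length := by
    rw [hRdef, PySem.List.length_pyRange_one]; omega
  have hlen : durate.length = R.length := by
    rw [hdurdef, hRlen]; simp
  have hqnodup : qs.Nodup := by
    apply List.Nodup.of_map (fun q : Int × Int => q.2)
    rw [hqsdef, List.map_map]
    have hcomp : ((fun q : Int × Int => q.2) ∘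
        (fun p : Int × List Int => ((-(p.2.sum), p.1) : Int × Int)))
        = fun p : Int × List Int => p.1 := rfl
    rw [hcomp, PySem.List.map_fst_enumerate]
    exact PySem.List.nodup_pyRange_one _ _
  have hz : (durate.zip R).Pairwise (fun a b => a.2 < b.2) := by
    rw [List.pairwise_iff_getElem]
    intro i j hi hj hij
    have hiR : i < R.length := by rw [List.length_zip] at hi; omega
    have hjR : j < R.length := by rw [List.length_zip] at hj; omega
    rw [List.getElem_zip, List.getElem_zip]
    show R[i] < R[j]
    have hiR' : i < (PySem.List.pyRange 0 (istanza.length : Int) 1).length := by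
      rwa [← hRdef]
    have hjR' : j < (PySem.List.pyRange 0 (istanza.length : Int) 1).length := by
      rwa [← hRdef]
    show (PySem.List.pyRange 0 (istanza.length : Int) 1)[i]'hiR'
        < (PySem.List.pyRange 0 (istanza.length : Int) 1)[j]'hjR'
    rw [PySem.List.getElem_pyRange_one 0 (istanza.length : Int) i hiR',
        PySem.List.getElem_pyRange_one 0 (istanza.length : Int) j hjR']
    omega
  have hmapf : qs.map (fun q : Int × Int => ((-q.1, q.2) : Int × Int)) = durate.zip R := by
    rw [hqz, List.map_map]
    have hid : ((fun q : Int × Int => ((-q.1, q.2) : Int × Int)) ∘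
        (fun p : Int × Int => ((-p.1, p.2) : Int × Int))) = id := by
      funext p; simp
    rw [hid, List.map_id]
  have hLperm : ((PySem.List.sorted2 qs (fun q => q.1) (fun q => q.2) false).map
      (fun q : Int × Int => ((-q.1, q.2) : Int × Int))).Perm (durate.zip R) := by
    have h1 := (PySem.List.sorted2_perm qs (fun q => q.1) (fun q => q.2) false).map
      (fun q : Int × Int => ((-q.1, q.2) : Int × Int))
    rwa [hmapf] at h1
  have hLsort : ((PySem.List.sorted2 qs (fun q => q.1) (fun q => q.2) false).map
      (fun q : Int × Int => ((-q.1, q.2) : Int × Int))).Pairwise pvDescLt := by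
    apply List.pairwise_map.mpr
    refine (sorted2_pairwise_lexLt qs hqnodup).imp ?_
    intro a b hab
    unfold pvLexLt at hab
    unfold pvDescLt
    simp only
    omega
  rw [loop_eq istanza.length durate R []
      ((PySem.List.sorted2 qs (fun q => q.1) (fun q => q.2) false).map
        (fun q : Int × Int => ((-q.1, q.2) : Int × Int)))
      hRlen hlen hz hLperm hLsort]
  unfold LPTGreedy_alt
  rw [← hqsdef, List.nil_append, List.map_map]
  rfl
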